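-- pv_equiv track=rewrite | github.com/BigArmen/david_learn_python | Урок4-6.py | my_iter_fcycle
-- ===== SOURCE A (Python) =====
-- import itertools
--
-- def my_iter_fcycle ( objekt_cycle, end_number):
--     с = 0
--     for el in itertools.cycle(objekt_cycle):
--         if с > end_number:
--             break
--         else:
--             с += 1
--             yield el
-- ===== SOURCE B (Python) =====
-- def my_iter_fcycle(objekt_cycle, end_number):
--     saved = list(objekt_cycle)
--     if not saved:
--         return
--     n = len(saved)
--     for i in range(end_number + 1):
--         yield saved[i % n]
-- ===== Notes on version B (the rewrite author's own statement) =====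
-- stated objective: simpler
-- what changed: Replaces the stateful itertools.cycle loop with a break/counter by a single pass over range(end_number+1) indexing a saved buffer with i % n (early return on empty input).
import Mathlib
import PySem

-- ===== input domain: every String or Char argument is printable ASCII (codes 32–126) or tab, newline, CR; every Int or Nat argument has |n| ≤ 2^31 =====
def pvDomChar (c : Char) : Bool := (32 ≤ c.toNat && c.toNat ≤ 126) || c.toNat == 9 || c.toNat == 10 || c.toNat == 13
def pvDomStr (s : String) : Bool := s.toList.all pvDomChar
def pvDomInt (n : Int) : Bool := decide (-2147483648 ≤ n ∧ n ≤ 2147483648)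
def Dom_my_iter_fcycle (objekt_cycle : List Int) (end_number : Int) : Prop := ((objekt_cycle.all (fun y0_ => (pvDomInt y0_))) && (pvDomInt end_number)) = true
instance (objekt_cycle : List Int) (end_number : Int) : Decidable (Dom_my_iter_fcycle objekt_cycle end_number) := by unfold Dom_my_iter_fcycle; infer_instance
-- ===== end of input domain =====

-- B replaces itertools.cycle's stateful loop-with-break by one pass over range(end_number+1) with i % n indexing; simpler, same cost.
-- ===== PORT A =====
-- A's for-loop over itertools.cycle: while c <= end_number, yield next cycled element and c += 1.
-- cycle([]) yields nothing, so the loop body never runs on an empty list.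
def my_iter_fcycle_loop (objekt_cycle : List Int) (end_number : Int) (c : Int) (i : Nat) : List Int :=
  if c > end_number then []
  else objekt_cycle.getD (i % objekt_cycle.length) 0 :: my_iter_fcycle_loop objekt_cycle end_number (c + 1) (i + 1)
termination_by (end_number + 1 - c).toNat
decreasing_by omega

def my_iter_fcycle (objekt_cycle : List Int) (end_number : Int) : List Int :=
  if objekt_cycle = [] then [] else my_iter_fcycle_loop objekt_cycle end_number 0 0

-- ===== PORT B =====
def my_iter_fcycle_alt (objekt_cycle : List Int) (end_number : Int) : List Int :=
  if objekt_cycle = [] then []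
  else (List.range (end_number + 1).toNat).map
    (fun i => objekt_cycle.getD (i % objekt_cycle.length) 0)

-- ===== PRECONDITION & SPEC =====
def Spec_my_iter_fcycle (objekt_cycle : List Int) (end_number : Int) (out : List Int) : Prop := out = my_iter_fcycle_alt objekt_cycle end_number
instance (objekt_cycle : List Int) (end_number : Int) (out : List Int) : Decidable (Spec_my_iter_fcycle objekt_cycle end_number out) := by unfold Spec_my_iter_fcycle; infer_instance

-- ===== CLAIM (what is proved, stated in full; the proofs are below) =====
def Claim_equal_my_iter_fcycle : Prop := ∀ (objekt_cycle : List Int) (end_number : Int), Dom_my_iter_fcycle objekt_cycle end_number → Spec_my_iter_fcycle objekt_cycle end_number (my_iter_fcycle objekt_cycle end_number)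

-- ===== LEMMAS AND PROOFS =====

-- ===== VERDICT (by name: the statement is the Claim_ definition above) =====
theorem my_iter_fcycle_loop_eq (objekt_cycle : List Int) (end_number : Int) :
    ∀ (n : Nat) (c : Int) (i : Nat), (end_number + 1 - c).toNat = n →
      my_iter_fcycle_loop objekt_cycle end_number c i =
        (List.range n).map (fun j => objekt_cycle.getD ((i + j) % objekt_cycle.length) 0) := by
  intro n
  induction n with
  | zero =>
    intro c i h
    rw [my_iter_fcycle_loop]
    simp only [List.range_zero, List.map_nil]
    rw [if_pos (by omega)]
  | succ m ih =>
    intro c i h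
    rw [my_iter_fcycle_loop, if_neg (by omega)]
    rw [ih (c + 1) (i + 1) (by omega)]
    rw [List.range_succ_eq_map, List.map_cons, List.map_map]
    refine congrArg₂ _ (by simp) (List.map_congr_left ?_)
    intro j _
    simp only [Function.comp_apply]
    congr 2
    omega

theorem my_iter_fcycle_spec : Claim_equal_my_iter_fcycle := by
  intro objekt_cycle end_number _
  unfold Spec_my_iter_fcycle my_iter_fcycle my_iter_fcycle_alt
  split
  · rfl
  · rw [my_iter_fcycle_loop_eq objekt_cycle end_number (end_number + 1 - 0).toNat 0 0 rfl]
    have h1 : (end_number + 1 - 0 : Int) = end_number + 1 := by omega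
    rw [h1]
    exact List.map_congr_left (fun j _ => by simp)
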